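-- pv_equiv track=rewrite | github.com/shreeya109/Othello-AI-Game | Othello_Final.py | fip_check
-- ===== SOURCE A (Python) =====
-- BOARD_SIZE = 8
--
-- def fip_check(board, x, y, dir_x, dir_y, cur_player):
--     x += dir_x
--     y += dir_y
--     # checks for the limits of the board
--     if x >= BOARD_SIZE or x < 0 or y >= BOARD_SIZE or y < 0 or board[y][x] != -cur_player:
--         return False
--     # move further along the direction
--     x += dir_x
--     y += dir_y
--     while 0 <= x < BOARD_SIZE and 0 <= y < BOARD_SIZE:
--         # checks if the opponents coins are between two of the cur_player's coins
--         if board[y][x] == cur_player: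
--             return True
--         elif board[y][x] == 0:
--             break
--         x += dir_x
--         y += dir_y
--     return False
-- ===== SOURCE B (Python) =====
-- BOARD_SIZE = 8
--
-- def fip_check(board, x, y, dir_x, dir_y, cur_player):
--     # Stage 1: materialize the whole ray of cell values from (x+dir_x, y+dir_y) outward.
--     ray = []
--     cx, cy = x + dir_x, y + dir_y
--     while 0 <= cx < BOARD_SIZE and 0 <= cy < BOARD_SIZE:
--         ray.append(board[cy][cx])
--         cx += dir_x
--         cy += dir_y
--     # Stage 2: flanking iff the ray starts with a nonempty run of opponent pieces
--     # followed immediately by one of cur_player's pieces.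
--     opp = -cur_player
--     run = 0
--     while run < len(ray) and ray[run] == opp:
--         run += 1
--     return 0 < run < len(ray) and ray[run] == cur_player
-- ===== Notes on version B (the rewrite author's own statement) =====
-- stated objective: alternative
-- what changed: B first materializes the ray of cell values along the direction into a list, then decides flanking by a prefix-pattern test on that list (a nonempty run of opponent cells followed by an own cell), instead of A's coordinate walk with a first-cell guard and in-loop early returns.
-- outside the precondition, e.g. on fip_check([[-1, 1], [0]], -1, 0, 1, 0, 1): A returns True, B raises IndexError
import Mathlib
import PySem

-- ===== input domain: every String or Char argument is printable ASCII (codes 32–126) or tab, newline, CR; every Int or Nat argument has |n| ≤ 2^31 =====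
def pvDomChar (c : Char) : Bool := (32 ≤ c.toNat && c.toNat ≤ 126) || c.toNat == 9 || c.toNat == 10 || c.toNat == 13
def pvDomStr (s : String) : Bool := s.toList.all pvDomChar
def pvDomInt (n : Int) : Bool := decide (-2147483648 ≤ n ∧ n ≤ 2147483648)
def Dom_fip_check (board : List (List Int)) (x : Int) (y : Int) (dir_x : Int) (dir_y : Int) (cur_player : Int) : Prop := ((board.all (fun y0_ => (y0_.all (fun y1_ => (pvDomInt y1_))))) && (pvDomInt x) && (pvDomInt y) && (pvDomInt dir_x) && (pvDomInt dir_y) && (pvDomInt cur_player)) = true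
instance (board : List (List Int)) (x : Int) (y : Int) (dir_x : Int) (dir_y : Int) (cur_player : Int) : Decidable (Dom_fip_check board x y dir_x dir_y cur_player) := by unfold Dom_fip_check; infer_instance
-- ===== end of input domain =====

-- B materializes the ray of cells along the direction into a list and then decides
-- flanking by a prefix-pattern test on that list (objective: alternative decomposition);
-- equal to A on the inputs admitted by Pre_.

-- board[y][x]: in-range double index (both indices are guarded 0 ≤ · < 8 before access;
-- under Pre_ every admitted access hits an existing cell, so getD's default 0 is never
-- the result)
def pvCell (board : List (List Int)) (x : Int) (y : Int) : Int :=
  (((PySem.List.pyGet? board y).bind (fun r => PySem.List.pyGet? r x)).getD 0)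

-- ===== PORT A =====
-- A's while-loop; fuel 20 exceeds the ≤ 8 iterations possible on an 8×8 board with a
-- nonzero direction (Pre_ excludes dir = (0,0) on an in-bounds ray, where A can diverge)
def fipALoop (board : List (List Int)) (dx dy p : Int) : Nat → Int → Int → Bool
  | 0, _, _ => false
  | f + 1, x, y =>
    if 0 ≤ x ∧ x < 8 ∧ 0 ≤ y ∧ y < 8 then
      if pvCell board x y = p then true
      else if pvCell board x y = 0 then false
      else fipALoop board dx dy p f (x + dx) (y + dy)
    else false

def fip_check (board : List (List Int)) (x : Int) (y : Int) (dir_x : Int) (dir_y : Int) (cur_player : Int) : Bool :=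
  let x1 := x + dir_x
  let y1 := y + dir_y
  if 8 ≤ x1 ∨ x1 < 0 ∨ 8 ≤ y1 ∨ y1 < 0 ∨ pvCell board x1 y1 ≠ -cur_player then false
  else fipALoop board dir_x dir_y cur_player 20 (x1 + dir_x) (y1 + dir_y)

-- ===== PORT B =====
-- B's stage-1 loop: collect the ray of cell values while the position stays on the board;
-- fuel 21 exceeds the ≤ 9 in-bounds positions reachable under Pre_
def fipRay (board : List (List Int)) (dx dy : Int) : Nat → Int → Int → List Int
  | 0, _, _ => []
  | f + 1, cx, cy =>
    if 0 ≤ cx ∧ cx < 8 ∧ 0 ≤ cy ∧ cy < 8 then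
      pvCell board cx cy :: fipRay board dx dy f (cx + dx) (cy + dy)
    else []

-- B's stage-2 loop: length of the leading run of cells equal to opp
def fipRun (opp : Int) : List Int → Nat
  | [] => 0
  | v :: rest => if v = opp then fipRun opp rest + 1 else 0

def fip_check_alt (board : List (List Int)) (x : Int) (y : Int) (dir_x : Int) (dir_y : Int) (cur_player : Int) : Bool :=
  let ray := fipRay board dir_x dir_y 21 (x + dir_x) (y + dir_y)
  let run := fipRun (-cur_player) ray
  -- ray[run]: guarded by run < ray.length, so getD's default is never the result
  decide (0 < run ∧ run < ray.length ∧ ray.getD run 0 = cur_player)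

-- ===== PRECONDITION & SPEC =====
-- If the first step lands off the 8×8 board both programs answer False untouched, so Pre_
-- asks nothing there; otherwise Pre_ is the standard Othello domain restricted to the ray:
-- a player of -1/1, a direction ≠ (0,0) (A can loop forever), and every in-bounds cell of
-- the ray exists in the board with value -1/0/1. It excludes: rays reaching a missing cell
-- (A raises IndexError when it reaches one, and B scans further than A so it can raise
-- where A returns), cur_player ∉ {-1,1} and junk cell values (there A's branch order gives
-- accidental values B does not reproduce; see cites).
def Pre_fip_check (board : List (List Int)) (x : Int) (y : Int) (dir_x : Int) (dir_y : Int) (cur_player : Int) : Prop :=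
  (0 ≤ x + dir_x ∧ x + dir_x < 8 ∧ 0 ≤ y + dir_y ∧ y + dir_y < 8) →
  ((cur_player = 1 ∨ cur_player = -1) ∧ ¬(dir_x = 0 ∧ dir_y = 0) ∧
   ∀ k : Nat, k < 8 →
     (0 ≤ x + ((k : Int)+1)*dir_x ∧ x + ((k : Int)+1)*dir_x < 8 ∧
      0 ≤ y + ((k : Int)+1)*dir_y ∧ y + ((k : Int)+1)*dir_y < 8) →
     ((y + ((k : Int)+1)*dir_y).toNat < board.length ∧
      (x + ((k : Int)+1)*dir_x).toNat < (board.getD (y + ((k : Int)+1)*dir_y).toNat []).length ∧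
      ((board.getD (y + ((k : Int)+1)*dir_y).toNat []).getD (x + ((k : Int)+1)*dir_x).toNat 0 = -1 ∨
       (board.getD (y + ((k : Int)+1)*dir_y).toNat []).getD (x + ((k : Int)+1)*dir_x).toNat 0 = 0 ∨
       (board.getD (y + ((k : Int)+1)*dir_y).toNat []).getD (x + ((k : Int)+1)*dir_x).toNat 0 = 1)))
instance (board : List (List Int)) (x : Int) (y : Int) (dir_x : Int) (dir_y : Int) (cur_player : Int) : Decidable (Pre_fip_check board x y dir_x dir_y cur_player) := by unfold Pre_fip_check; infer_instance

def pvWitness_fip_check : List (List Int) × Int × Int × Int × Int × Int :=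
  (List.replicate 8 (List.replicate 8 (0 : Int)), 3, 3, 1, 0, 1)

def Spec_fip_check (board : List (List Int)) (x : Int) (y : Int) (dir_x : Int) (dir_y : Int) (cur_player : Int) (out : Bool) : Prop := out = fip_check_alt board x y dir_x dir_y cur_player
instance (board : List (List Int)) (x : Int) (y : Int) (dir_x : Int) (dir_y : Int) (cur_player : Int) (out : Bool) : Decidable (Spec_fip_check board x y dir_x dir_y cur_player out) := by unfold Spec_fip_check; infer_instance

-- ===== CLAIM (what is proved, stated in full; the proofs are below) =====
def Claim_equal_fip_check : Prop := ∀ (board : List (List Int)) (x : Int) (y : Int) (dir_x : Int) (dir_y : Int) (cur_player : Int), Dom_fip_check board x y dir_x dir_y cur_player → Pre_fip_check board x y dir_x dir_y cur_player → Spec_fip_check board x y dir_x dir_y cur_player (fip_check board x y dir_x dir_y cur_player)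

-- ===== LEMMAS AND PROOFS =====

-- what B's stage-2 computes on a ray
def raySpec (p : Int) (L : List Int) : Bool :=
  decide (fipRun (-p) L < L.length ∧ L.getD (fipRun (-p) L) 0 = p)

-- an existing cell read through pvCell is the cell itself
lemma pvCell_eq (board : List (List Int)) (a b : Int) (ha0 : 0 ≤ a) (hb0 : 0 ≤ b)
    (hb : b.toNat < board.length) (ha : a.toNat < (board.getD b.toNat []).length) :
    pvCell board a b = (board.getD b.toNat []).getD a.toNat 0 := by
  have h1 : PySem.List.pyGet? board b = some board[b.toNat] := by
    rw [PySem.List.pyGet?_of_nonneg board hb0, List.getElem?_eq_getElem hb]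
  have hrow : board.getD b.toNat [] = board[b.toNat] := by
    simp [List.getD, List.getElem?_eq_getElem hb]
  have ha' : a.toNat < board[b.toNat].length := hrow ▸ ha
  have h2 : PySem.List.pyGet? board[b.toNat] a = some board[b.toNat][a.toNat] := by
    rw [PySem.List.pyGet?_of_nonneg _ ha0, List.getElem?_eq_getElem ha']
  simp [pvCell, h1, h2, List.getD, List.getElem?_eq_getElem hb, List.getElem?_eq_getElem ha']

-- A's loop from a position equals B's prefix-pattern test on the ray from that position,
-- given every in-bounds cell along the ray is -1/0/1
lemma loop_eq_raySpec (board : List (List Int)) (dx dy p : Int) (hp : p = 1 ∨ p = -1) :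
    ∀ (f : Nat) (u v : Int),
      (∀ k : Nat, (0 ≤ u + (k : Int)*dx ∧ u + (k : Int)*dx < 8 ∧
                   0 ≤ v + (k : Int)*dy ∧ v + (k : Int)*dy < 8) →
        (pvCell board (u + (k : Int)*dx) (v + (k : Int)*dy) = -1 ∨
         pvCell board (u + (k : Int)*dx) (v + (k : Int)*dy) = 0 ∨
         pvCell board (u + (k : Int)*dx) (v + (k : Int)*dy) = 1)) →
      fipALoop board dx dy p f u v = raySpec p (fipRay board dx dy f u v) := by
  intro f
  induction f with
  | zero => intro u v _; simp [fipALoop, fipRay, raySpec, fipRun]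
  | succ f ih =>
    intro u v hc
    have h0 := hc 0
    simp only [Nat.cast_zero, zero_mul, add_zero] at h0
    have hnext : ∀ k : Nat, (0 ≤ (u + dx) + (k : Int)*dx ∧ (u + dx) + (k : Int)*dx < 8 ∧
                   0 ≤ (v + dy) + (k : Int)*dy ∧ (v + dy) + (k : Int)*dy < 8) →
        (pvCell board ((u + dx) + (k : Int)*dx) ((v + dy) + (k : Int)*dy) = -1 ∨
         pvCell board ((u + dx) + (k : Int)*dx) ((v + dy) + (k : Int)*dy) = 0 ∨
         pvCell board ((u + dx) + (k : Int)*dx) ((v + dy) + (k : Int)*dy) = 1) := by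
      intro k hk
      have e1 : (u + dx) + (k : Int)*dx = u + ((k + 1 : Nat) : Int)*dx := by push_cast; ring
      have e2 : (v + dy) + (k : Int)*dy = v + ((k + 1 : Nat) : Int)*dy := by push_cast; ring
      rw [e1, e2] at hk ⊢
      exact hc (k + 1) hk
    rw [show fipALoop board dx dy p (f + 1) u v =
        (if 0 ≤ u ∧ u < 8 ∧ 0 ≤ v ∧ v < 8 then
          if pvCell board u v = p then true
          else if pvCell board u v = 0 then false
          else fipALoop board dx dy p f (u + dx) (v + dy)
        else false) from rfl,
       show fipRay board dx dy (f + 1) u v =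
        (if 0 ≤ u ∧ u < 8 ∧ 0 ≤ v ∧ v < 8 then
          pvCell board u v :: fipRay board dx dy f (u + dx) (v + dy)
        else []) from rfl]
    by_cases hin : (0 ≤ u ∧ u < 8 ∧ 0 ≤ v ∧ v < 8)
    · rw [if_pos hin, if_pos hin]
      have hcell := h0 hin
      set c := pvCell board u v with hcv
      by_cases h1 : c = p
      · have hpp : ¬ p = -p := by rcases hp with h | h <;> simp [h]
        rw [if_pos h1]
        simp [raySpec, fipRun, h1, hpp]
      · by_cases h0' : c = 0
        · have hpz : ¬ p = 0 := by rcases hp with h | h <;> simp [h]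
          rw [if_neg h1, if_pos h0']
          simp [raySpec, fipRun, h0', hpz, eq_comm]
        · have heq : c = -p := by
            rcases hp with h | h <;> subst h <;> rcases hcell with h' | h' | h' <;> omega
          rw [if_neg h1, if_neg h0', ih _ _ hnext]
          simp only [raySpec, fipRun, heq, if_true]
          simp [List.getD]
    · rw [if_neg hin, if_neg hin]
      simp [raySpec, fipRun]

-- ===== VERDICT (by name: the statement is the Claim_ definition above) =====
theorem fip_check_spec : Claim_equal_fip_check := by
  intro board x y dx dy p _ hpre
  show fip_check board x y dx dy p = fip_check_alt board x y dx dy p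
  unfold fip_check fip_check_alt
  set a := x + dx with hav
  set b := y + dy with hbv
  rw [show fipRay board dx dy 21 a b =
      (if 0 ≤ a ∧ a < 8 ∧ 0 ≤ b ∧ b < 8 then
        pvCell board a b :: fipRay board dx dy 20 (a + dx) (b + dy)
      else []) from rfl]
  by_cases hin : (0 ≤ a ∧ a < 8 ∧ 0 ≤ b ∧ b < 8)
  · obtain ⟨hp, hdir, hcells⟩ := hpre ⟨hin.1, hin.2.1, hin.2.2.1, hin.2.2.2⟩
    rw [if_pos hin]
    -- every in-bounds cell of the ray starting one step further is -1/0/1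
    have hstart : ∀ k : Nat, (0 ≤ (a + dx) + (k : Int)*dx ∧ (a + dx) + (k : Int)*dx < 8 ∧
                   0 ≤ (b + dy) + (k : Int)*dy ∧ (b + dy) + (k : Int)*dy < 8) →
        (pvCell board ((a + dx) + (k : Int)*dx) ((b + dy) + (k : Int)*dy) = -1 ∨
         pvCell board ((a + dx) + (k : Int)*dx) ((b + dy) + (k : Int)*dy) = 0 ∨
         pvCell board ((a + dx) + (k : Int)*dx) ((b + dy) + (k : Int)*dy) = 1) := by
      intro k hk
      -- the step count is < 7: the coordinate that moves leaves [0,8) after ≤ 7 steps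
      have hk7 : k + 1 < 8 := by
        have ex : (a + dx) + (k : Int)*dx = a + ((k : Int)+1)*dx := by ring
        have ey : (b + dy) + (k : Int)*dy = b + ((k : Int)+1)*dy := by ring
        rw [ex, ey] at hk
        by_contra hge
        have hk8 : (8 : Int) ≤ (k : Int) + 1 := by omega
        rcases (not_and_or.mp hdir) with hdx | hdy
        · rcases lt_or_gt_of_ne hdx with hneg | hpos
          · have : ((k : Int)+1)*dx ≤ ((k : Int)+1)*(-1) :=
              mul_le_mul_of_nonneg_left (by omega) (by omega)
            omega
          · have : ((k : Int)+1)*1 ≤ ((k : Int)+1)*dx :=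
              mul_le_mul_of_nonneg_left (by omega) (by omega)
            omega
        · rcases lt_or_gt_of_ne hdy with hneg | hpos
          · have : ((k : Int)+1)*dy ≤ ((k : Int)+1)*(-1) :=
              mul_le_mul_of_nonneg_left (by omega) (by omega)
            omega
          · have : ((k : Int)+1)*dy ≥ ((k : Int)+1)*1 :=
              mul_le_mul_of_nonneg_left (by omega) (by omega)
            omega
      have ex : (a + dx) + (k : Int)*dx = x + (((k+1 : Nat) : Int)+1)*dx := by
        rw [hav]; push_cast; ring
      have ey : (b + dy) + (k : Int)*dy = y + (((k+1 : Nat) : Int)+1)*dy := by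
        rw [hbv]; push_cast; ring
      rw [ex, ey] at hk ⊢
      obtain ⟨hrow, hcol, hval⟩ := hcells (k+1) hk7 hk
      rw [pvCell_eq board _ _ hk.1 hk.2.2.1 hrow hcol]
      exact hval
    by_cases hcell : pvCell board a b = -p
    · have hguard : ¬(8 ≤ a ∨ a < 0 ∨ 8 ≤ b ∨ b < 0 ∨ pvCell board a b ≠ -p) := by
        simp only [not_or, not_lt, not_le, not_not]
        exact ⟨by omega, by omega, by omega, by omega, hcell⟩
      rw [if_neg hguard, loop_eq_raySpec board dx dy p hp 20 (a + dx) (b + dy) hstart]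
      simp only [raySpec, fipRun, hcell, if_true]
      simp [List.getD]
    · have hguard : (8 ≤ a ∨ a < 0 ∨ 8 ≤ b ∨ b < 0 ∨ pvCell board a b ≠ -p) := by tauto
      rw [if_pos hguard]
      simp [fipRun, hcell]
  · have hguard : (8 ≤ a ∨ a < 0 ∨ 8 ≤ b ∨ b < 0 ∨ pvCell board a b ≠ -p) := by
      by_contra h
      simp only [not_or, not_lt, not_le, not_not] at h
      exact hin ⟨by omega, by omega, by omega, by omega⟩
    rw [if_pos hguard, if_neg hin]
    simp [fipRun]
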